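-- pv_equiv track=rewrite | github.com/smilstea/IOS-XR-Maintenance-Window-Checker | ios_xr_mw_comparer.py | show_redundancy_totals
-- ===== SOURCE A (Python) =====
-- def show_redundancy_totals(sh_cmd_dict):
--     ###__author__     = "Sam Milstead"
--     ###__copyright__  = "Copyright 2020 (C) Cisco TAC"
--     ###__version__    = "1.0.0"
--     ###__status__     = "alpha"
--     #Perform some magic on the pre and post lines of output for show redundancy
--     #Each line being an item in a list
--     #Determine total process groups and states
--     counters = {'Total Groups': 0, 'Process Groups in Not Ready State': 0, 'Process Groups in Not NSR-Ready State': 0, 'Process Groups in Ready State': 0}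
--     for key in sh_cmd_dict:
--         counters['Total Groups'] += 1
--         if sh_cmd_dict[key]['status'] == 'Not NSR-Ready':
--             counters['Process Groups in Not NSR-Ready State'] += 1
--         elif sh_cmd_dict[key]['status'] == 'Not Ready':
--             counters['Process Groups in Not Ready State'] += 1
--         elif sh_cmd_dict[key]['status'] == 'Ready':
--             counters['Process Groups in Ready State'] += 1
--     return counters
-- ===== SOURCE B (Python) =====
-- def show_redundancy_totals(sh_cmd_dict):
--     # Staged passes: extract the status list once, then count each named
--     # status with list.count; no per-element branching at all.
--     statuses = [v['status'] for v in sh_cmd_dict.values()]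
--     return {
--         'Total Groups': len(statuses),
--         'Process Groups in Not Ready State': statuses.count('Not Ready'),
--         'Process Groups in Not NSR-Ready State': statuses.count('Not NSR-Ready'),
--         'Process Groups in Ready State': statuses.count('Ready'),
--     }
-- ===== Notes on version B (the rewrite author's own statement) =====
-- stated objective: idiomatic
-- what changed: Replaces the single branching loop over four pre-seeded counters with staged passes: project the status list once, then compute each bucket independently with len() and three list.count() scans, so the elif chain and the mutable counter state disappear.
import Mathlib
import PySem

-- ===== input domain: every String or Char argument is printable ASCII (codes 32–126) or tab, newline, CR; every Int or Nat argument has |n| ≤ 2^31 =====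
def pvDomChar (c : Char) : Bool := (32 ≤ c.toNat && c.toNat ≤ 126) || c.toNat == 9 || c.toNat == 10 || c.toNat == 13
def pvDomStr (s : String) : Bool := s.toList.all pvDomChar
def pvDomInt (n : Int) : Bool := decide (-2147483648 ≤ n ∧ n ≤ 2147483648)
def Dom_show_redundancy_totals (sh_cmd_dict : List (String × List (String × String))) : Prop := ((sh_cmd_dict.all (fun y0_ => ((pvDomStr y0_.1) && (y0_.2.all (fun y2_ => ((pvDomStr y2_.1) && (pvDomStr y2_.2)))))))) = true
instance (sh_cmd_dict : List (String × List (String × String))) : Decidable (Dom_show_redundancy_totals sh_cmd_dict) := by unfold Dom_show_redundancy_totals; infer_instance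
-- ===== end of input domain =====

-- B replaces A's branching counter loop by staged passes (project the status list, then len and three list.count scans); idiomatic, same cost.


-- ===== PORT A =====
-- A's loop: for each key, total += 1, then the elif chain; each branch re-reads
-- sh_cmd_dict[key]['status'] exactly as the Python does. The two Python subscripts
-- raise KeyError when the key is absent; Pre_ guarantees presence, so .getD is only a totalizer.
def show_redundancy_totals (sh_cmd_dict : List (String × List (String × String))) : List (String × Int) :=
  let counters : PySem.Dict String Int :=
    ((((PySem.Dict.empty.insert "Total Groups" 0).insert "Process Groups in Not Ready State" 0).insert
        "Process Groups in Not NSR-Ready State" 0).insert "Process Groups in Ready State" 0)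
  let counters := sh_cmd_dict.foldl (fun c kv =>
    let c := c.insert "Total Groups" (c.getD "Total Groups" 0 + 1)
    if ((PySem.Dict.mk (((PySem.Dict.mk sh_cmd_dict).get? kv.1).getD [])).get? "status").getD "" = "Not NSR-Ready" then
      c.insert "Process Groups in Not NSR-Ready State" (c.getD "Process Groups in Not NSR-Ready State" 0 + 1)
    else if ((PySem.Dict.mk (((PySem.Dict.mk sh_cmd_dict).get? kv.1).getD [])).get? "status").getD "" = "Not Ready" then
      c.insert "Process Groups in Not Ready State" (c.getD "Process Groups in Not Ready State" 0 + 1)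
    else if ((PySem.Dict.mk (((PySem.Dict.mk sh_cmd_dict).get? kv.1).getD [])).get? "status").getD "" = "Ready" then
      c.insert "Process Groups in Ready State" (c.getD "Process Groups in Ready State" 0 + 1)
    else c) counters
  counters.items

-- ===== PORT B =====
-- B: build the status list once (the comprehension), then four independent aggregations.
def show_redundancy_totals_alt (sh_cmd_dict : List (String × List (String × String))) : List (String × Int) :=
  let statuses : List String := sh_cmd_dict.map (fun kv => ((PySem.Dict.mk kv.2).get? "status").getD "")
  [("Total Groups", (statuses.length : Int)),
   ("Process Groups in Not Ready State", (PySem.List.count statuses "Not Ready" : Int)),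
   ("Process Groups in Not NSR-Ready State", (PySem.List.count statuses "Not NSR-Ready" : Int)),
   ("Process Groups in Ready State", (PySem.List.count statuses "Ready" : Int))]

-- ===== PRECONDITION & SPEC =====
-- Pre_ excludes association lists with duplicate outer keys (they do not represent a Python dict — A's argument is a dict)
-- and inputs where some inner dict has no 'status' key, on which A raises KeyError.
def Pre_show_redundancy_totals (sh_cmd_dict : List (String × List (String × String))) : Prop :=
  (sh_cmd_dict.map Prod.fst).Nodup ∧ ∀ p ∈ sh_cmd_dict, "status" ∈ p.2.map Prod.fst
instance (sh_cmd_dict : List (String × List (String × String))) : Decidable (Pre_show_redundancy_totals sh_cmd_dict) := by unfold Pre_show_redundancy_totals; infer_instance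
def pvWitness_show_redundancy_totals : (List (String × List (String × String))) :=
  [("proc1", [("status", "Ready")]), ("proc2", [("status", "Not Ready")])]
def Spec_show_redundancy_totals (sh_cmd_dict : List (String × List (String × String))) (out : List (String × Int)) : Prop := out = show_redundancy_totals_alt sh_cmd_dict
instance (sh_cmd_dict : List (String × List (String × String))) (out : List (String × Int)) : Decidable (Spec_show_redundancy_totals sh_cmd_dict out) := by unfold Spec_show_redundancy_totals; infer_instance

-- ===== CLAIM (what is proved, stated in full; the proofs are below) =====
def Claim_equal_show_redundancy_totals : Prop := ∀ (sh_cmd_dict : List (String × List (String × String))), Dom_show_redundancy_totals sh_cmd_dict → Pre_show_redundancy_totals sh_cmd_dict → Spec_show_redundancy_totals sh_cmd_dict (show_redundancy_totals sh_cmd_dict)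

-- ===== LEMMAS AND PROOFS =====

-- the status string both versions extract from one value list
def pvStatusOf (v : List (String × String)) : String :=
  ((PySem.Dict.mk v).get? "status").getD ""

-- A's seeded 4-key counter dict, with variable values
def pvD0 (t a b c : Int) : PySem.Dict String Int :=
  PySem.Dict.mk [("Total Groups", t), ("Process Groups in Not Ready State", a),
    ("Process Groups in Not NSR-Ready State", b), ("Process Groups in Ready State", c)]

-- A's loop body as a function of the extracted status string
def pvStepA (c : PySem.Dict String Int) (s : String) : PySem.Dict String Int :=
  let c := c.insert "Total Groups" (c.getD "Total Groups" 0 + 1)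
  if s = "Not NSR-Ready" then
    c.insert "Process Groups in Not NSR-Ready State" (c.getD "Process Groups in Not NSR-Ready State" 0 + 1)
  else if s = "Not Ready" then
    c.insert "Process Groups in Not Ready State" (c.getD "Process Groups in Not Ready State" 0 + 1)
  else if s = "Ready" then
    c.insert "Process Groups in Ready State" (c.getD "Process Groups in Ready State" 0 + 1)
  else c

lemma pvStepA_D0 (t a b c : Int) (s : String) :
    pvStepA (pvD0 t a b c) s = pvD0 (t + 1) (a + if s = "Not Ready" then 1 else 0)
      (b + if s = "Not NSR-Ready" then 1 else 0) (c + if s = "Ready" then 1 else 0) := by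
  unfold pvStepA pvD0
  split_ifs <;> simp_all [PySem.Dict.insert, PySem.Dict.getD, PySem.Dict.get?, PySem.Dict.contains]

lemma pvFoldA (ss : List String) (t a b c : Int) :
    ss.foldl pvStepA (pvD0 t a b c) =
      pvD0 (t + ss.length) (a + ss.count "Not Ready")
        (b + ss.count "Not NSR-Ready") (c + ss.count "Ready") := by
  induction ss generalizing t a b c with
  | nil => simp
  | cons s ss ih =>
    rw [List.foldl_cons, pvStepA_D0, ih]
    simp only [pvD0, List.count_cons, List.length_cons, PySem.Dict.mk.injEq]
    split_ifs <;> simp_all <;> (try constructor) <;> ring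

theorem show_redundancy_totals_spec : Claim_equal_show_redundancy_totals := by
  intro l _ hpre
  obtain ⟨hnd, hst⟩ := hpre
  show show_redundancy_totals l = show_redundancy_totals_alt l
  have hkeys : (PySem.Dict.mk l).keys.Nodup := hnd
  simp only [show_redundancy_totals, show_redundancy_totals_alt]
  -- A's per-element whole-dict lookup returns the element's own value (outer keys are Nodup)
  have hcongrA : l.foldl (fun c kv =>
      if ((PySem.Dict.mk (((PySem.Dict.mk l).get? kv.1).getD [])).get? "status").getD "" = "Not NSR-Ready" then
        (c.insert "Total Groups" (c.getD "Total Groups" 0 + 1)).insert "Process Groups in Not NSR-Ready State"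
          ((c.insert "Total Groups" (c.getD "Total Groups" 0 + 1)).getD "Process Groups in Not NSR-Ready State" 0 + 1)
      else if ((PySem.Dict.mk (((PySem.Dict.mk l).get? kv.1).getD [])).get? "status").getD "" = "Not Ready" then
        (c.insert "Total Groups" (c.getD "Total Groups" 0 + 1)).insert "Process Groups in Not Ready State"
          ((c.insert "Total Groups" (c.getD "Total Groups" 0 + 1)).getD "Process Groups in Not Ready State" 0 + 1)
      else if ((PySem.Dict.mk (((PySem.Dict.mk l).get? kv.1).getD [])).get? "status").getD "" = "Ready" then
        (c.insert "Total Groups" (c.getD "Total Groups" 0 + 1)).insert "Process Groups in Ready State"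
          ((c.insert "Total Groups" (c.getD "Total Groups" 0 + 1)).getD "Process Groups in Ready State" 0 + 1)
      else c.insert "Total Groups" (c.getD "Total Groups" 0 + 1))
      ((((PySem.Dict.empty.insert "Total Groups" 0).insert "Process Groups in Not Ready State" 0).insert
          "Process Groups in Not NSR-Ready State" 0).insert "Process Groups in Ready State" 0)
      = l.foldl (fun c kv => pvStepA c (pvStatusOf kv.2)) (pvD0 0 0 0 0) := by
    have hinit : ((((PySem.Dict.empty.insert "Total Groups" (0:Int)).insert "Process Groups in Not Ready State" 0).insert
        "Process Groups in Not NSR-Ready State" 0).insert "Process Groups in Ready State" 0) = pvD0 0 0 0 0 := by decide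
    rw [hinit]
    apply PySem.List.foldl_congr_mem
    intro acc kv hmem
    have hget : (PySem.Dict.mk l).get? kv.1 = some kv.2 :=
      PySem.Dict.get?_of_mem_items (PySem.Dict.mk l) (by simpa using hmem) hkeys
    simp only [hget, Option.getD_some, pvStepA, pvStatusOf]
    rfl
  rw [hcongrA, show (l.foldl (fun c kv => pvStepA c (pvStatusOf kv.2)) (pvD0 0 0 0 0)
      = (l.map (fun kv => pvStatusOf kv.2)).foldl pvStepA (pvD0 0 0 0 0)) from List.foldl_map.symm,
    pvFoldA]
  simp [pvD0, PySem.List.count_eq, pvStatusOf]
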